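-- pv_equiv track=rewrite | github.com/danielweidman/pixmob-ir-reverse-engineering | python_tools/flipper_file_to_ones_and_zeroes.py | split_run_length_list
-- ===== SOURCE A (Python) =====
-- def split_run_length_list(run_length_list, max_zeroes=6, max_ones=7, pulse_length=694):
--     # Split the run length lists into individual codes on runs of more zeroes longer than max_zeroes
--     # Returns list of list of ints
--     split_run_length_lists = []
--     start = 0
--     skip = False
--     for i, val in enumerate(run_length_list):
--         # check if too many zeros (an even index indicates it is a zero)
--         if val > max_zeroes * pulse_length and i % 2 == 1:
--             if not skip:
--                 split_run_length_lists.append(run_length_list[start:i])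
--             start = i + 1
--             skip = False
--         # Throw out codes with too many ones in a row
--         if val > max_ones * pulse_length and i % 2 == 0:
--             skip = True
--     if not skip:
--         # ignore empty lists from the end of a recording
--         if len(run_length_list[start:]) != 0:
--             split_run_length_lists.append(run_length_list[start:])
--     return split_run_length_lists
-- ===== SOURCE B (Python) =====
-- def split_run_length_list(run_length_list, max_zeroes=6, max_ones=7, pulse_length=694):
--     # Repeatedly cut at the first over-long zero run and vet each segment on its own,
--     # instead of one stateful pass with a persistent skip flag.
--     zero_limit = max_zeroes * pulse_length
--     one_limit = max_ones * pulse_length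
--
--     out = []
--     rest = run_length_list
--     while True:
--         split = next((i for i, v in enumerate(rest) if i % 2 == 1 and v > zero_limit), None)
--         if split is None:
--             if rest and all(v <= one_limit for i, v in enumerate(rest) if i % 2 == 0):
--                 out.append(rest)
--             return out
--         seg = rest[:split]
--         if all(v <= one_limit for i, v in enumerate(seg) if i % 2 == 0):
--             out.append(seg)
--         rest = rest[split + 1:]
-- ===== Notes on version B (the rewrite author's own statement) =====
-- stated objective: alternative
-- what changed: A's single stateful pass (persistent skip flag, start index, slices of the whole list) is replaced by repeated cutting at the first over-long zero run, vetting each segment independently with a per-segment scan for over-long one runs.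
import Mathlib
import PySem

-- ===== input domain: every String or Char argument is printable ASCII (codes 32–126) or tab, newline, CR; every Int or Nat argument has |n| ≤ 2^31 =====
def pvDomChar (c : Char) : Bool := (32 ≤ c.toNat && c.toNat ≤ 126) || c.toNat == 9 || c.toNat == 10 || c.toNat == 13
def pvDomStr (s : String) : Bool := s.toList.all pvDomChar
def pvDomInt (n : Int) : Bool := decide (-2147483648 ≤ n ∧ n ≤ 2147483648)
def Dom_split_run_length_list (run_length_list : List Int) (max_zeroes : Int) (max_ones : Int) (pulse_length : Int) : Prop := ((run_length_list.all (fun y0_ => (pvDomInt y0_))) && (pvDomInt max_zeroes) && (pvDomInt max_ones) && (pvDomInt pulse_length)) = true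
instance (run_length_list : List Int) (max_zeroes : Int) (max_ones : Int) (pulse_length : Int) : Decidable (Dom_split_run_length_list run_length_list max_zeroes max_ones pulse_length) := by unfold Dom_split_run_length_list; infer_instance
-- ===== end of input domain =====

-- B replaces A's single stateful pass (persistent skip flag + start index) by repeated
-- cutting at the first over-long zero run with a per-segment scan; objective: alternative.

-- ===== PORT A =====
-- A's loop state is (split_run_length_lists, start, skip); the loop runs over enumerate(run_length_list).
def split_run_length_list (run_length_list : List Int) (max_zeroes : Int) (max_ones : Int) (pulse_length : Int) : List (List Int) :=
  let st := (PySem.List.enumerate run_length_list 0).foldl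
    (fun (s : List (List Int) × Int × Bool) iv =>
      -- if val > max_zeroes * pulse_length and i % 2 == 1:
      let s1 := if iv.2 > max_zeroes * pulse_length ∧ PySem.Int.mod iv.1 2 = 1 then
          ((if ¬ s.2.2 then s.1 ++ [PySem.List.slice run_length_list (some s.2.1) (some iv.1)] else s.1),
           iv.1 + 1, false)
        else s
      -- if val > max_ones * pulse_length and i % 2 == 0:
      if iv.2 > max_ones * pulse_length ∧ PySem.Int.mod iv.1 2 = 0 then (s1.1, s1.2.1, true) else s1)
    ([], 0, false)
  if ¬ st.2.2 then
    if (PySem.List.slice run_length_list (some st.2.1) none).length ≠ 0 then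
      st.1 ++ [PySem.List.slice run_length_list (some st.2.1) none]
    else st.1
  else st.1

-- ===== PORT B =====
-- next((i for i, v in enumerate(rest) if i % 2 == 1 and v > zero_limit), None)
def pvFirstSplit (rest : List Int) (zero_limit : Int) : Option Int :=
  ((PySem.List.enumerate rest 0).find?
    (fun iv => (PySem.Int.mod iv.1 2 == 1) && decide (iv.2 > zero_limit))).map (·.1)

-- all(v <= one_limit for i, v in enumerate(seg) if i % 2 == 0)
def pvOnesOk (seg : List Int) (one_limit : Int) : Bool :=
  (PySem.List.enumerate seg 0).all
    (fun iv => !(PySem.Int.mod iv.1 2 == 0) || decide (iv.2 ≤ one_limit))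

-- termination helper for the while loop: the found index is a real index of rest
theorem pvFirstSplit_bounds {rest : List Int} {zl i : Int} (h : pvFirstSplit rest zl = some i) :
    0 ≤ i ∧ i < rest.length := by
  unfold pvFirstSplit at h
  rcases Option.map_eq_some_iff.mp h with ⟨iv, hfind, hfst⟩
  have hmem := List.mem_of_find?_eq_some hfind
  rcases (PySem.List.mem_enumerate_iff _ _ _).mp hmem with ⟨k, hk, hp⟩
  subst hp; simp at hfst; omega

-- the while loop of B (out is the accumulator `out`)
def pvBLoop (rest : List Int) (zero_limit one_limit : Int) (out : List (List Int)) : List (List Int) :=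
  match h : pvFirstSplit rest zero_limit with
  | none =>
    if rest ≠ [] ∧ pvOnesOk rest one_limit then out ++ [rest] else out
  | some i =>
    let seg := PySem.List.slice rest none (some i)
    pvBLoop (PySem.List.slice rest (some (i + 1)) none) zero_limit one_limit
      (out ++ (if pvOnesOk seg one_limit then [seg] else []))
termination_by rest.length
decreasing_by
  obtain ⟨h0, hlt⟩ := pvFirstSplit_bounds h
  rw [show PySem.List.slice rest (some (i + 1)) none = rest.drop (i + 1).toNat from
    PySem.List.slice_from rest (by omega)]
  simp only [List.length_drop]; omega

def split_run_length_list_alt (run_length_list : List Int) (max_zeroes : Int) (max_ones : Int) (pulse_length : Int) : List (List Int) :=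
  pvBLoop run_length_list (max_zeroes * pulse_length) (max_ones * pulse_length) []

-- ===== PRECONDITION & SPEC =====
def Spec_split_run_length_list (run_length_list : List Int) (max_zeroes : Int) (max_ones : Int) (pulse_length : Int) (out : List (List Int)) : Prop := out = split_run_length_list_alt run_length_list max_zeroes max_ones pulse_length
instance (run_length_list : List Int) (max_zeroes : Int) (max_ones : Int) (pulse_length : Int) (out : List (List Int)) : Decidable (Spec_split_run_length_list run_length_list max_zeroes max_ones pulse_length out) := by unfold Spec_split_run_length_list; infer_instance

-- ===== CLAIM (what is proved, stated in full; the proofs are below) =====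
def Claim_equal_split_run_length_list : Prop := ∀ (run_length_list : List Int) (max_zeroes : Int) (max_ones : Int) (pulse_length : Int), Dom_split_run_length_list run_length_list max_zeroes max_ones pulse_length → Spec_split_run_length_list run_length_list max_zeroes max_ones pulse_length (split_run_length_list run_length_list max_zeroes max_ones pulse_length)

-- ===== LEMMAS AND PROOFS =====

-- Common pivot: A's pass expressed as a structural recursion carrying the pending segment.
-- `even` is the parity flag of the current index (true at even indices).
def pvCore (l : List Int) (zl ol : Int) (even : Bool) (pending : List Int) (skip : Bool) : List (List Int) :=
  match l with
  | [] => if skip then [] else if pending = [] then [] else [pending]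
  | v :: r =>
    if v > zl ∧ even = false then
      (if ¬ skip then [pending] else []) ++ pvCore r zl ol (!even) [] false
    else
      pvCore r zl ol (!even) (pending ++ [v]) (if v > ol ∧ even = true then true else skip)

-- first relative split position, by parity flag
def pvFS (zl : Int) : List Int → Bool → Option Nat
  | [], _ => none
  | v :: r, even =>
    if v > zl ∧ even = false then some 0 else (pvFS zl r (!even)).map (· + 1)

-- per-segment ones check, by parity flag
def pvOK (ol : Int) : List Int → Bool → Bool
  | [], _ => true
  | v :: r, even => (!even || decide (v ≤ ol)) && pvOK ol r (!even)

theorem pvFirstSplit_eq_pvFS (zl : Int) :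
    ∀ (l : List Int) (k : Nat),
      (((PySem.List.enumerate l (k : Int)).find?
        (fun iv => (PySem.Int.mod iv.1 2 == 1) && decide (iv.2 > zl))).map (·.1))
      = (pvFS zl l (k % 2 == 0)).map (fun j => ((k + j : Nat) : Int)) := by
  intro l
  induction l with
  | nil => intro k; simp [PySem.List.enumerate, pvFS]
  | cons v r ih =>
    intro k
    rw [PySem.List.enumerate_cons, List.find?_cons]
    have hmod : PySem.Int.mod (k : Int) 2 = ((k % 2 : Nat) : Int) := by
      exact_mod_cast PySem.Int.mod_natCast k 2
    have hcast : ((k : Int) + 1) = ((k+1 : Nat) : Int) := by push_cast; ring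
    rcases Nat.mod_two_eq_zero_or_one k with hk | hk
    · have hp : ((PySem.Int.mod ((k:Int)) 2 == 1) && decide (v > zl)) = false := by
        rw [hmod, hk]; rfl
      rw [hp]
      have h2 : (k+1) % 2 = 1 := by omega
      rw [hcast, ih (k+1)]
      simp only [pvFS, hk, h2, show ((1:Nat) == 0) = false from rfl,
        show ((0:Nat) == 0) = true from rfl, Bool.not_true,
        if_neg (by simp : ¬ (v > zl ∧ true = false)), Option.map_map]
      congr 1; funext j; simp only [Function.comp_apply]; push_cast; ring
    · by_cases hv : v > zl
      · have hp : ((PySem.Int.mod ((k:Int)) 2 == 1) && decide (v > zl)) = true := by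
          rw [hmod, hk]; simp [hv]
        rw [hp]
        simp only [pvFS, hk, show ((1:Nat) == 0) = false from rfl]
        rw [if_pos ⟨hv, trivial⟩]
        simp
      · have hp : ((PySem.Int.mod ((k:Int)) 2 == 1) && decide (v > zl)) = false := by
          rw [hmod, hk]; simp [hv]
        rw [hp]
        have h2 : (k+1) % 2 = 0 := by omega
        rw [hcast, ih (k+1)]
        simp only [pvFS, hk, h2, show ((1:Nat) == 0) = false from rfl,
          show ((0:Nat) == 0) = true from rfl]
        rw [if_neg (by simp [hv])]
        simp only [Option.map_map]
        congr 1; funext j; simp only [Function.comp_apply]; push_cast; ring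


theorem pvOnesOk_eq_pvOK (ol : Int) :
    ∀ (l : List Int) (k : Nat),
      ((PySem.List.enumerate l (k : Int)).all
        (fun iv => !(PySem.Int.mod iv.1 2 == 0) || decide (iv.2 ≤ ol)))
      = pvOK ol l (k % 2 == 0) := by
  intro l
  induction l with
  | nil => simp [PySem.List.enumerate, pvOK]
  | cons v r ih =>
    intro k
    rw [PySem.List.enumerate_cons, List.all_cons]
    have hmod : PySem.Int.mod (k : Int) 2 = ((k % 2 : Nat) : Int) := by
      exact_mod_cast PySem.Int.mod_natCast k 2
    have hcast : ((k : Int) + 1) = ((k+1 : Nat) : Int) := by push_cast; ring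
    rw [hcast, ih (k+1)]
    rcases Nat.mod_two_eq_zero_or_one k with hk | hk
    · have h2 : (k+1) % 2 = 1 := by omega
      rw [hmod, hk]
      simp only [pvOK, h2, show ((1:Nat) == 0) = false from rfl,
        show ((0:Nat) == 0) = true from rfl]
      simp
    · have h2 : (k+1) % 2 = 0 := by omega
      rw [hmod, hk]
      simp only [pvOK, h2, show ((1:Nat) == 0) = false from rfl,
        show ((0:Nat) == 0) = true from rfl]
      simp


-- pvCore when no split remains
theorem pvCore_no_split (zl ol : Int) :
    ∀ (l : List Int) (even : Bool) (pending : List Int) (skip : Bool),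
      pvFS zl l even = none →
      pvCore l zl ol even pending skip =
        if skip = false ∧ pvOK ol l even = true ∧ pending ++ l ≠ [] then [pending ++ l] else [] := by
  intro l
  induction l with
  | nil =>
    intro even pending skip _
    simp only [pvCore, pvOK, List.append_nil]
    cases skip <;> cases pending <;> simp
  | cons v r ih =>
    intro even pending skip hfs
    simp only [pvFS] at hfs
    split at hfs
    · exact absurd hfs (by simp)
    · rename_i hcond
      have hr : pvFS zl r (!even) = none := by
        rcases h : pvFS zl r (!even) with _ | j
        · rfl
        · rw [h] at hfs; simp at hfs
      simp only [pvCore, if_neg hcond]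
      rw [ih (!even) (pending ++ [v]) _ hr]
      have hne1 : pending ++ [v] ++ r ≠ [] := by simp
      have hne2 : pending ++ (v :: r) ≠ [] := by simp
      simp only [hne1, hne2, ne_eq, not_false_iff, and_true]
      have hassoc : pending ++ [v] ++ r = pending ++ (v :: r) := by simp
      rw [hassoc]
      congr 1
      simp only [pvOK]
      cases even <;> cases skip <;> by_cases hvo : v > ol <;>
        simp_all [not_lt.mpr, decide_eq_true_eq]


-- pvCore at the first split
theorem pvCore_split (zl ol : Int) :
    ∀ (l : List Int) (even : Bool) (pending : List Int) (skip : Bool) (i : Nat),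
      pvFS zl l even = some i →
      pvCore l zl ol even pending skip =
        (if skip = false ∧ pvOK ol (l.take i) even = true then [pending ++ l.take i] else [])
        ++ pvCore (l.drop (i + 1)) zl ol true [] false := by
  intro l
  induction l with
  | nil => intro even pending skip i h; simp [pvFS] at h
  | cons v r ih =>
    intro even pending skip i hfs
    simp only [pvFS] at hfs
    split at hfs
    · rename_i hcond
      have hi : i = 0 := by simpa using hfs.symm
      subst hi
      have heven : even = false := hcond.2
      subst heven
      simp only [pvCore, List.take_zero, List.drop_succ_cons, List.drop_zero,
        pvOK, List.append_nil]
      rw [if_pos (show v > zl ∧ True from ⟨hcond.1, trivial⟩)]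
      cases skip <;> simp
    · rename_i hcond
      rcases h : pvFS zl r (!even) with _ | j
      · rw [h] at hfs; simp at hfs
      · rw [h] at hfs
        simp only [Option.map_some] at hfs
        have hij : i = j + 1 := by exact (Option.some_inj.mp hfs).symm
        subst hij
        simp only [pvCore, if_neg hcond]
        rw [ih (!even) (pending ++ [v]) _ j h]
        simp only [List.take_succ_cons, List.drop_succ_cons]
        congr 1
        have hassoc : pending ++ [v] ++ r.take j = pending ++ (v :: r.take j) := by simp
        rw [hassoc]
        congr 1
        simp only [pvOK]
        cases even <;> cases skip <;> by_cases hvo : v > ol <;>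
          simp_all [not_lt.mpr, decide_eq_true_eq]



theorem pvFirstSplit_eq_pvFS' (zl : Int) (l : List Int) :
    pvFirstSplit l zl = (pvFS zl l true).map (fun j => (j : Int)) := by
  have h := pvFirstSplit_eq_pvFS zl l 0
  simp only [Nat.cast_zero, Nat.zero_mod] at h
  unfold pvFirstSplit
  rw [h]
  show Option.map _ (pvFS zl l ((0:Nat) == 0)) = _
  norm_num
  cases pvFS zl l true <;> rfl

theorem pvOnesOk_eq_pvOK' (ol : Int) (l : List Int) :
    pvOnesOk l ol = pvOK ol l true := by
  have h := pvOnesOk_eq_pvOK ol l 0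
  simp only [Nat.cast_zero, Nat.zero_mod] at h
  unfold pvOnesOk
  rw [h]
  norm_num

-- B's loop equals pvCore
theorem pvBLoop_eq_core (zl ol : Int) :
    ∀ (rest : List Int) (out : List (List Int)),
      pvBLoop rest zl ol out = out ++ pvCore rest zl ol true [] false := by
  intro rest out
  fun_induction pvBLoop rest zl ol out with
  | case1 rest out h hcond =>
    rw [pvFirstSplit_eq_pvFS'] at h
    have hfs : pvFS zl rest true = none := by
      rcases hh : pvFS zl rest true with _ | j
      · rfl
      · rw [hh] at h; simp at h
    rw [pvCore_no_split zl ol rest true [] _ hfs]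
    rw [if_pos ⟨rfl, (pvOnesOk_eq_pvOK' ol rest) ▸ hcond.2, by simp [hcond.1]⟩]
    simp
  | case2 rest out h hcond =>
    rw [pvFirstSplit_eq_pvFS'] at h
    have hfs : pvFS zl rest true = none := by
      rcases hh : pvFS zl rest true with _ | j
      · rfl
      · rw [hh] at h; simp at h
    rw [pvCore_no_split zl ol rest true [] _ hfs]
    rw [if_neg (by
      rw [pvOnesOk_eq_pvOK' ol rest] at hcond
      intro hc
      exact hcond ⟨by simpa using hc.2.2, hc.2.1⟩)]
    simp
  | case3 rest out i h =>
    rename_i seg ih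
    try simp only [dite_eq_ite] at ih
    rw [pvFirstSplit_eq_pvFS'] at h
    rcases hh : pvFS zl rest true with _ | j
    · rw [hh] at h; simp at h
    · rw [hh] at h
      have hi : i = (j : Int) := by simpa using h.symm
      subst hi
      have hseg : seg = rest.take j := by
        simp only [seg]
        exact PySem.List.slice_to_natCast rest j
      have hrest : PySem.List.slice rest (some ((j:Int) + 1)) none = rest.drop (j+1) := by
        rw [show ((j:Int) + 1) = ((j+1 : Nat) : Int) by push_cast; ring]
        exact PySem.List.slice_from_natCast rest (j+1)
      rw [ih, hrest, pvCore_split zl ol rest true [] false j hh]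
      rw [hseg, pvOnesOk_eq_pvOK']
      simp only [List.nil_append, List.append_assoc, true_and]


-- A's fold invariant
theorem pvA_inv (rll : List Int) (mz mo pl : Int) :
    ∀ (r : List Int) (k start : Nat) (acc : List (List Int)) (skip : Bool),
      r = rll.drop k → start ≤ k →
      (let st := (PySem.List.enumerate r (k : Int)).foldl
        (fun (s : List (List Int) × Int × Bool) iv =>
          let s1 := if iv.2 > mz * pl ∧ PySem.Int.mod iv.1 2 = 1 then
              ((if ¬ s.2.2 then s.1 ++ [PySem.List.slice rll (some s.2.1) (some iv.1)] else s.1),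
               iv.1 + 1, false)
            else s
          if iv.2 > mo * pl ∧ PySem.Int.mod iv.1 2 = 0 then (s1.1, s1.2.1, true) else s1)
        (acc, (start : Int), skip)
      if ¬ st.2.2 then
        if (PySem.List.slice rll (some st.2.1) none).length ≠ 0 then
          st.1 ++ [PySem.List.slice rll (some st.2.1) none]
        else st.1
      else st.1)
      = acc ++ pvCore r (mz * pl) (mo * pl) (k % 2 == 0) ((rll.take k).drop start) skip := by
  intro r
  induction r with
  | nil =>
    intro k start acc skip hr hsk
    have hlen : rll.length ≤ k := by
      by_contra hlt
      have := congrArg List.length hr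
      simp at this; omega
    have htake : rll.take k = rll := List.take_of_length_le hlen
    have hslice : PySem.List.slice rll (some (start:Int)) none = rll.drop start :=
      PySem.List.slice_from_natCast rll start
    simp only [PySem.List.enumerate, List.foldl_nil, pvCore, htake, hslice]
    cases skip with
    | true => simp
    | false =>
      by_cases hp : rll.drop start = []
      · simp [hp]
      · have hsl : start < rll.length := by
          by_contra hge
          exact hp (List.drop_eq_nil_of_le (by omega))
        simp [hp]
        omega
  | cons v r' ih =>
    intro k start acc skip hr hsk
    have hk : k < rll.length := by
      by_contra hge
      rw [List.drop_eq_nil_of_le (by omega)] at hr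
      exact List.cons_ne_nil _ _ hr
    have hv : rll[k]'hk = v := by
      have h0 : (rll.drop k)[0]'(by rw [← hr]; simp) = v := by
        simp [← hr]
      rw [List.getElem_drop] at h0
      simpa using h0
    have hr' : r' = rll.drop (k+1) := by
      rw [← List.tail_drop, ← hr]; rfl
    have hmod : PySem.Int.mod (k : Int) 2 = ((k % 2 : Nat) : Int) := by
      exact_mod_cast PySem.Int.mod_natCast k 2
    have hcast1 : ((k : Int) + 1) = ((k+1 : Nat) : Int) := by push_cast; ring
    have hpend : PySem.List.slice rll (some (start:Int)) (some (k:Int)) = (rll.take k).drop start := by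
      rw [PySem.List.slice_natCast, List.drop_take]
    have htk : (rll.take k).length = k := by simp; omega
    rw [PySem.List.enumerate_cons, List.foldl_cons]
    rcases Nat.mod_two_eq_zero_or_one k with hk2 | hk2
    · -- even index: no zero-split; maybe set skip
      have hc1 : ¬ (v > mz * pl ∧ PySem.Int.mod ((k:Int)) 2 = 1) := by
        rw [hmod, hk2]; simp
      by_cases hvo : v > mo * pl
      · have hc2 : (v > mo * pl ∧ PySem.Int.mod ((k:Int)) 2 = 0) := by
          rw [hmod, hk2]; exact ⟨hvo, by simp⟩
        simp only [if_neg hc1, if_pos hc2]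
        rw [hcast1, ih (k+1) start acc true hr' (by omega)]
        have hpend' : (rll.take (k+1)).drop start = (rll.take k).drop start ++ [v] := by
          rw [List.take_succ_eq_append_getElem hk, hv,
            List.drop_append_of_le_length (by omega)]
        rw [hpend']
        have h2 : (k+1) % 2 = 1 := by omega
        simp only [pvCore, hk2, h2]
        rw [if_neg (by simp : ¬ ((v > mz * pl) ∧ ((0:Nat) == 0) = false))]
        rw [if_pos (show v > mo * pl ∧ ((0:Nat) == 0) = true from ⟨hvo, rfl⟩)]
        rfl
      · have hc2 : ¬ (v > mo * pl ∧ PySem.Int.mod ((k:Int)) 2 = 0) := by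
          intro hc; exact hvo hc.1
        simp only [if_neg hc1, if_neg hc2]
        rw [hcast1, ih (k+1) start acc skip hr' (by omega)]
        have hpend' : (rll.take (k+1)).drop start = (rll.take k).drop start ++ [v] := by
          rw [List.take_succ_eq_append_getElem hk, hv,
            List.drop_append_of_le_length (by omega)]
        rw [hpend']
        have h2 : (k+1) % 2 = 1 := by omega
        simp only [pvCore, hk2, h2]
        rw [if_neg (by simp : ¬ ((v > mz * pl) ∧ ((0:Nat) == 0) = false))]
        rw [if_neg (show ¬ (v > mo * pl ∧ ((0:Nat) == 0) = true) from fun hc => hvo hc.1)]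
        rfl
    · -- odd index: maybe split; ones-check cannot fire
      have hc2 : ¬ (v > mo * pl ∧ PySem.Int.mod ((k:Int)) 2 = 0) := by
        rw [hmod, hk2]; simp
      by_cases hvz : v > mz * pl
      · have hc1 : (v > mz * pl ∧ PySem.Int.mod ((k:Int)) 2 = 1) := by
          rw [hmod, hk2]; exact ⟨hvz, by simp⟩
        simp only [if_pos hc1, if_neg hc2]
        rw [hcast1, ih (k+1) (k+1) _ false hr' (by omega)]
        have hdrop : (rll.take (k+1)).drop (k+1) = [] :=
          List.drop_eq_nil_of_le (by simp)
        rw [hdrop]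
        have h2 : (k+1) % 2 = 0 := by omega
        simp only [pvCore, hk2, h2]
        rw [if_pos (show v > mz * pl ∧ ((1:Nat) == 0) = false from ⟨hvz, rfl⟩)]
        rw [hpend]
        cases skip <;> simp
      · have hc1 : ¬ (v > mz * pl ∧ PySem.Int.mod ((k:Int)) 2 = 1) := by
          intro hc; exact hvz hc.1
        simp only [if_neg hc1, if_neg hc2]
        rw [hcast1, ih (k+1) start acc skip hr' (by omega)]
        have hpend' : (rll.take (k+1)).drop start = (rll.take k).drop start ++ [v] := by
          rw [List.take_succ_eq_append_getElem hk, hv,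
            List.drop_append_of_le_length (by omega)]
        rw [hpend']
        have h2 : (k+1) % 2 = 0 := by omega
        simp only [pvCore, hk2, h2]
        rw [if_neg (show ¬ (v > mz * pl ∧ ((1:Nat) == 0) = false) from fun hc => hvz hc.1)]
        rw [if_neg (show ¬ (v > mo * pl ∧ ((1:Nat) == 0) = true) from by simp)]
        rfl


-- ===== VERDICT (by name: the statement is the Claim_ definition above) =====
theorem split_run_length_list_spec : Claim_equal_split_run_length_list := by
  intro rll mz mo pl _
  unfold Spec_split_run_length_list split_run_length_list split_run_length_list_alt
  rw [pvBLoop_eq_core]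
  have hA := pvA_inv rll mz mo pl rll 0 0 [] false (by simp) (le_refl 0)
  simpa using hA
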